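-- pv_equiv track=rewrite | github.com/Orin111/Boggle | ex12_utils.py | find_point_length_n_paths
-- ===== SOURCE A (Python) =====
-- DIRECTIONS = [(-1, 0), (1, 0), (0, -1), (0, 1), (-1, -1), (-1, 1), (1, -1),
--               (1, 1)]
--
-- def is_ind_on_board(ind, board):
--     """
--
--     :param ind: a Tuple with the location we want to check.
--     :param board:
--     :return: True if the location is legal. False otherwise.
--     """
--     row, col = ind[0], ind[1]
--     if row >= len(board) or row < 0:
--         return False
--     if col >= len(board[0]) or col < 0:
--         return False
--     return True
--
-- def possible_moves(board, row, col):
--     """ This function returns a dictionary with all the possible moves of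
--     of the user and the current location that the user is in."""
--     list_of_moves = []
--     # checks that the current location is on the board:
--     if is_ind_on_board((row, col), board):
--         list_of_moves.append((row, col))
--     else:
--         return list_of_moves
--
--     for direction in DIRECTIONS:
--         d_row, d_col = direction[0], direction[1]
--         if is_ind_on_board((row + d_row, col + d_col), board):
--             list_of_moves.append((row + d_row, col + d_col))
--     return list_of_moves
--
-- def find_point_length_n_paths(n, board, list_of_legal, counter,
--                               path, flag):
--     """
--     :param n: number of paths
--     :param board: the board of the game
--     :param list_of_legal:
--     :param counter: length of path/ word
--     :param path: current path
--     :param flag: True if we are returning paths according to length of words.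
--                  False if we are returning paths with length n.
--     :return: a list of legal paths from a specific point
--     """
--     if counter > n:
--         return
--     if counter == n:
--         list_of_legal.append(path[:])
--         return list_of_legal
--     possible_m = possible_moves(board, path[-1][0], path[-1][1])
--     for point in possible_m:
--         if point not in path:
--             path.append(point)
--             if flag:
--                 find_point_length_n_paths(n, board,
--                                           list_of_legal,
--                                           counter + len(board[point[0]][point[1]]), path, flag)
--             else:
--                 find_point_length_n_paths(n, board,
--                                           list_of_legal,
--                                           counter + 1, path, flag)
--             path.pop()
--     return list_of_legal
-- ===== SOURCE B (Python) =====
-- # Iterative DFS with an explicit stack of (path-copy, counter) frames instead of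
-- # recursive backtracking; mutates list_of_legal like the original (appends found
-- # paths) but never mutates `path`, which the original restores anyway.
-- DIRECTIONS = [(-1, 0), (1, 0), (0, -1), (0, 1), (-1, -1), (-1, 1), (1, -1),
--               (1, 1)]
--
-- def _cell_moves(board, row, col):
--     rows = len(board)
--     cols = len(board[0]) if board else 0
--     if not (0 <= row < rows and 0 <= col < cols):
--         return []
--     return [(r, c)
--             for (r, c) in [(row, col)] + [(row + dr, col + dc)
--                                           for dr, dc in DIRECTIONS]
--             if 0 <= r < rows and 0 <= c < cols]
--
-- def find_point_length_n_paths(n, board, list_of_legal, counter, path, flag):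
--     if counter > n:
--         return None
--     stack = [(list(path), counter)]
--     while stack:
--         p, c = stack.pop()
--         if c == n:
--             list_of_legal.append(p)
--             continue
--         row, col = p[-1]
--         frames = []
--         for pt in _cell_moves(board, row, col):
--             if pt not in p:
--                 step = len(board[pt[0]][pt[1]]) if flag else 1
--                 if c + step <= n:
--                     frames.append((p + [pt], c + step))
--         stack.extend(reversed(frames))
--     return list_of_legal
-- ===== Notes on version B (the rewrite author's own statement) =====
-- stated objective: alternative
-- what changed: Recursive backtracking on a shared mutable path (append/recurse/pop) is replaced by an iterative DFS over an explicit stack of (path-copy, counter) frames, with neighbour generation as a single bounds-checked comprehension and over-budget frames pruned at push time instead of by the callee's counter>n base case.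
-- outside the precondition, e.g. on find_point_length_n_paths(5, [['a'], []], [], 0, [(1, 0), (0, 0)], True): A returns [], B returns []
import Mathlib
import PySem

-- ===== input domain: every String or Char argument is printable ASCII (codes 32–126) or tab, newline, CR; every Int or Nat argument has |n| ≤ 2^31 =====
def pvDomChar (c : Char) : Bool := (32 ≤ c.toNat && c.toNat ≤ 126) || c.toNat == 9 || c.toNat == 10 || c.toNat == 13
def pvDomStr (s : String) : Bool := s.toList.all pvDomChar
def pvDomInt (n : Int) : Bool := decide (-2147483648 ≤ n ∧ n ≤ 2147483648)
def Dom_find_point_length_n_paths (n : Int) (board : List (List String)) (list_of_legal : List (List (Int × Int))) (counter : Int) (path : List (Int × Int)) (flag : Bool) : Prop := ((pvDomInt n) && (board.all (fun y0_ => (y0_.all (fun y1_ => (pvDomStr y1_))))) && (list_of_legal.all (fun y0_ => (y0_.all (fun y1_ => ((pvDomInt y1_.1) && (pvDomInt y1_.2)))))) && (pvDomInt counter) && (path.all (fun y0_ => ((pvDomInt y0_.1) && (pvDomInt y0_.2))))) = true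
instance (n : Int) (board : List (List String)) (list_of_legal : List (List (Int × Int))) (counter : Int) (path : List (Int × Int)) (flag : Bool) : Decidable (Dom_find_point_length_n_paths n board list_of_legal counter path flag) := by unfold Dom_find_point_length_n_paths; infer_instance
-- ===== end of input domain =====

-- B replaces A's recursive backtracking on a shared mutable path by an iterative DFS over an
-- explicit stack of (path-copy, counter) frames (objective: alternative decomposition, same cost).
-- A mutates its `list_of_legal` argument (appends) and temporarily mutates `path` but restores it;
-- B performs the same appends to `list_of_legal` and never mutates `path`; the theorems below are
-- about the RETURN value.

-- ===== PORT A =====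
def pvDirections : List (Int × Int) :=
  [(-1, 0), (1, 0), (0, -1), (0, 1), (-1, -1), (-1, 1), (1, -1), (1, 1)]

-- `len(board[point[0]][point[1]])` (both sources contain this exact expression); total via
-- defaults, exact whenever the indices are in range (guaranteed under Pre_ below).
def pvCellLen (board : List (List String)) (pt : Int × Int) : Int :=
  PySem.Str.len (PySem.List.pyGetD (PySem.List.pyGetD board pt.1 []) pt.2 "")

def is_ind_on_board (ind : Int × Int) (board : List (List String)) : Bool :=
  if ind.1 ≥ (board.length : Int) ∨ ind.1 < 0 then false
  -- board[0] is only evaluated here when 0 ≤ ind.1 < len(board), so board ≠ [] and headD is exact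
  else if ind.2 ≥ ((PySem.List.pyGetD board 0 []).length : Int) ∨ ind.2 < 0 then false
  else true

def possible_moves (board : List (List String)) (row col : Int) : List (Int × Int) :=
  if is_ind_on_board (row, col) board then
    pvDirections.foldl
      (fun acc d =>
        if is_ind_on_board (row + d.1, col + d.2) board then acc ++ [(row + d.1, col + d.2)]
        else acc)
      [(row, col)]
  else []

-- termination infrastructure: the on-board cells, and how many of them a path has not used yet
def pvCells (board : List (List String)) : List (Int × Int) :=
  ((List.range board.length) ×ˢ (List.range (PySem.List.pyGetD board 0 []).length)).map
    (fun rc => ((rc.1 : Int), (rc.2 : Int)))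

def pvFree (board : List (List String)) (path : List (Int × Int)) : Nat :=
  ((pvCells board).filter (fun q => !(path.contains q))).length

lemma mem_pvCells_iff {board : List (List String)} {q : Int × Int} :
    q ∈ pvCells board
      ↔ (0 ≤ q.1 ∧ q.1 < (board.length : Int) ∧ 0 ≤ q.2 ∧
          q.2 < ((PySem.List.pyGetD board 0 []).length : Int)) := by
  obtain ⟨qr, qc⟩ := q
  constructor
  · intro h
    rcases List.mem_map.1 h with ⟨⟨a, b⟩, hab, heq⟩
    simp only [SProd.sprod, List.pair_mem_product, List.mem_range] at hab
    rw [Prod.mk.injEq] at heq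
    obtain ⟨h1, h2⟩ := heq
    simp only at h1 h2
    omega
  · rintro ⟨h1, h2, h3, h4⟩
    refine List.mem_map.2 ⟨(qr.toNat, qc.toNat), ?_, ?_⟩
    · simp only [SProd.sprod, List.pair_mem_product, List.mem_range]
      constructor <;> omega
    · rw [Prod.mk.injEq]
      constructor <;> simp <;> omega

lemma possible_moves_eq (board : List (List String)) (row col : Int) :
    possible_moves board row col
      = if is_ind_on_board (row, col) board then
          (row, col) ::
            (pvDirections.filter (fun d => is_ind_on_board (row + d.1, col + d.2) board)).map
              (fun d => (row + d.1, col + d.2))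
        else [] := by
  unfold possible_moves
  split_ifs
  · have h := PySem.List.foldl_append_if
      (p := fun d => is_ind_on_board (row + d.1, col + d.2) board)
      (f := fun d => (row + d.1, col + d.2)) pvDirections [(row, col)]
    simpa using h
  · rfl

lemma mem_pvCells_of_on_board {q : Int × Int} {board : List (List String)}
    (h : is_ind_on_board q board = true) : q ∈ pvCells board := by
  simp only [is_ind_on_board] at h
  split_ifs at h with h1 h2
  push_neg at h1 h2
  exact mem_pvCells_iff.2 ⟨by omega, by omega, by omega, by omega⟩

lemma mem_possible_moves_on_board {q : Int × Int} {board : List (List String)} {row col : Int}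
    (h : q ∈ possible_moves board row col) : is_ind_on_board q board = true := by
  rw [possible_moves_eq] at h
  split_ifs at h with h0
  · rcases List.mem_cons.1 h with h | h
    · rw [h]; exact h0
    · rcases List.mem_map.1 h with ⟨d, hd, rfl⟩
      exact (List.mem_filter.1 hd).2
  · simp at h

lemma length_possible_moves_le (board : List (List String)) (row col : Int) :
    (possible_moves board row col).length ≤ 9 := by
  rw [possible_moves_eq]
  split_ifs
  · have h := List.length_filter_le
      (fun d => is_ind_on_board (row + d.1, col + d.2) board) pvDirections
    have h8 : pvDirections.length = 8 := rfl
    simp only [List.length_cons, List.length_map]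
    omega
  · simp

lemma length_filter_lt_of_mem {α : Type} {l : List α} {p q : α → Bool}
    (hmono : ∀ x ∈ l, q x = true → p x = true) {a : α} (ha : a ∈ l)
    (hpa : p a = true) (hqa : q a = false) :
    (l.filter q).length < (l.filter p).length := by
  obtain ⟨l1, l2, rfl⟩ := List.append_of_mem ha
  simp only [List.filter_append, List.filter_cons, hpa, hqa, List.length_append, if_true,
    Bool.false_eq_true, if_false, List.length_cons]
  have h1 : (l1.filter q).length ≤ (l1.filter p).length := by
    rw [← List.countP_eq_length_filter, ← List.countP_eq_length_filter]
    exact List.countP_mono_left (fun x hx => hmono x (by simp [hx]))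
  have h2 : (l2.filter q).length ≤ (l2.filter p).length := by
    rw [← List.countP_eq_length_filter, ← List.countP_eq_length_filter]
    exact List.countP_mono_left (fun x hx => hmono x (by simp [hx]))
  omega

lemma pvFree_lt_append {board : List (List String)} {path : List (Int × Int)} {pt : Int × Int}
    (hcell : pt ∈ pvCells board) (hnot : pt ∉ path) :
    pvFree board (path ++ [pt]) < pvFree board path := by
  unfold pvFree
  refine length_filter_lt_of_mem ?_ hcell ?_ ?_
  · intro x hx hqx
    simp only [List.contains_eq_mem, List.mem_append, Bool.not_eq_eq_eq_not, Bool.not_true,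
      decide_eq_false_iff_not, List.mem_singleton] at hqx ⊢
    tauto
  · simp [hnot]
  · simp

mutual
def goA (n : Int) (board : List (List String)) (flag : Bool)
    (acc : List (List (Int × Int))) (counter : Int) (path : List (Int × Int)) :
    List (List (Int × Int)) :=
  if counter > n then acc                 -- `return` (None): the caller's list is unchanged
  else if counter = n then acc ++ [path]  -- list_of_legal.append(path[:])
  else
    -- possible_m = possible_moves(board, path[-1][0], path[-1][1]); Pre_ gives path ≠ []
    let last := path.getLastD (0, 0)
    loopA n board flag last.1 last.2 acc counter path
      ((possible_moves board last.1 last.2).attach)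
termination_by 10 * pvFree board path + 10
decreasing_by
  simp only [List.length_attach]
  have := length_possible_moves_le board (path.getLastD (0, 0)).1 (path.getLastD (0, 0)).2
  omega

-- the `for point in possible_m:` loop; the subtype carries the fact each point is a possible move
def loopA (n : Int) (board : List (List String)) (flag : Bool) (row col : Int)
    (acc : List (List (Int × Int))) (counter : Int) (path : List (Int × Int))
    (moves : List {q // q ∈ possible_moves board row col}) : List (List (Int × Int)) :=
  match moves with
  | [] => acc
  | ⟨pt, hpt⟩ :: rest =>
    let acc' :=
      if h : pt ∈ path then acc
      else
        if flag then goA n board flag acc (counter + pvCellLen board pt) (path ++ [pt])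
        else goA n board flag acc (counter + 1) (path ++ [pt])
    loopA n board flag row col acc' counter path rest
termination_by 10 * pvFree board path + moves.length
decreasing_by
  · have := pvFree_lt_append (mem_pvCells_of_on_board (mem_possible_moves_on_board hpt)) h
    simp only [List.length_cons]
    omega
  · have := pvFree_lt_append (mem_pvCells_of_on_board (mem_possible_moves_on_board hpt)) h
    simp only [List.length_cons]
    omega
  · simp only [List.length_cons]
    omega
end

def find_point_length_n_paths (n : Int) (board : List (List String)) (list_of_legal : List (List (Int × Int))) (counter : Int) (path : List (Int × Int)) (flag : Bool) : Option (List (List (Int × Int))) :=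
  if counter > n then none
  else some (goA n board flag list_of_legal counter path)

-- ===== PORT B =====
def cell_moves (board : List (List String)) (row col : Int) : List (Int × Int) :=
  let rows : Int := board.length
  let cols : Int := if board.isEmpty then 0 else ((PySem.List.pyGetD board 0 []).length : Int)
  if ¬ (0 ≤ row ∧ row < rows ∧ 0 ≤ col ∧ col < cols) then []
  else
    ((row, col) :: pvDirections.map (fun d => (row + d.1, col + d.2))).filter
      (fun q => decide (0 ≤ q.1 ∧ q.1 < rows ∧ 0 ≤ q.2 ∧ q.2 < cols))

-- the body of the `for pt in _cell_moves(...)` frame-building loop, as an Option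
def pvFrameOf (n : Int) (board : List (List String)) (flag : Bool)
    (p : List (Int × Int)) (c : Int) (pt : Int × Int) : Option (List (Int × Int) × Int) :=
  if pt ∈ p then none
  else if c + (if flag then pvCellLen board pt else 1) ≤ n then
    some (p ++ [pt], c + (if flag then pvCellLen board pt else 1))
  else none

-- the `for pt in _cell_moves(...)` frame-building loop of Source B
def pvFrames (n : Int) (board : List (List String)) (flag : Bool)
    (p : List (Int × Int)) (c : Int) (l : List (Int × Int)) : List (List (Int × Int) × Int) :=
  l.foldl (fun fs pt =>
      if pt ∈ p then fs
      else
        let step := if flag then pvCellLen board pt else 1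
        if c + step ≤ n then fs ++ [(p ++ [pt], c + step)] else fs) []

lemma frames_foldl_eq (n : Int) (board : List (List String)) (flag : Bool)
    (p : List (Int × Int)) (c : Int) (l : List (Int × Int)) :
    pvFrames n board flag p c l = l.filterMap (pvFrameOf n board flag p c) := by
  unfold pvFrames
  suffices h : ∀ init : List (List (Int × Int) × Int),
      l.foldl (fun fs pt =>
        if pt ∈ p then fs
        else
          let step := if flag then pvCellLen board pt else 1
          if c + step ≤ n then fs ++ [(p ++ [pt], c + step)] else fs) init
      = init ++ l.filterMap (pvFrameOf n board flag p c) by simpa using h []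
  induction l with
  | nil => simp
  | cons pt rest ih =>
    intro init
    simp only [List.foldl_cons, List.filterMap_cons, ih, pvFrameOf]
    split_ifs <;> simp

lemma pvFrameOf_eq_some {n : Int} {board : List (List String)} {flag : Bool}
    {p : List (Int × Int)} {c : Int} {pt : Int × Int} {fr : List (Int × Int) × Int}
    (hsome : pvFrameOf n board flag p c pt = some fr) :
    pt ∉ p ∧ fr.1 = p ++ [pt] := by
  simp only [pvFrameOf] at hsome
  split_ifs at hsome
  all_goals exact ⟨by assumption, by rw [← Option.some.inj hsome]⟩

lemma mem_pvCells_of_cell_moves {q : Int × Int} {board : List (List String)} {row col : Int}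
    (h : q ∈ cell_moves board row col) : q ∈ pvCells board := by
  simp only [cell_moves] at h
  by_cases hg : (0 ≤ row ∧ row < (board.length : Int) ∧ 0 ≤ col ∧
      col < (if board.isEmpty then 0 else ((PySem.List.pyGetD board 0 []).length : Int)))
  · rw [if_neg (by simpa using hg)] at h
    have hq := (List.mem_filter.1 h).2
    simp only [decide_eq_true_eq] at hq
    obtain ⟨h1, h2, h3, h4⟩ := hq
    by_cases hb : board.isEmpty
    · rw [if_pos hb] at h4; omega
    · rw [if_neg hb] at h4
      exact mem_pvCells_iff.2 ⟨h1, h2, h3, h4⟩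
  · rw [if_pos (by simpa using hg)] at h
    simp at h

lemma length_cell_moves_le (board : List (List String)) (row col : Int) :
    (cell_moves board row col).length ≤ 9 := by
  simp only [cell_moves]
  split_ifs
  all_goals first
    | exact le_trans (List.length_filter_le _ _) (by simp [pvDirections])
    | simp

lemma frames_measure_lt {n : Int} {board : List (List String)} {flag : Bool}
    {p : List (Int × Int)} {c : Int} {row col : Int} :
    (((cell_moves board row col).filterMap (pvFrameOf n board flag p c)).map
        (fun fr => 10 ^ pvFree board fr.1)).sum < 10 ^ pvFree board p := by
  set frames := (cell_moves board row col).filterMap (pvFrameOf n board flag p c) with hfr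
  have hterm : ∀ t ∈ frames.map (fun fr => 10 ^ pvFree board fr.1),
      10 * t ≤ 10 ^ pvFree board p := by
    intro t ht
    rcases List.mem_map.1 ht with ⟨fr, hfrm, rfl⟩
    rcases List.mem_filterMap.1 hfrm with ⟨pt, hpt, hsome⟩
    obtain ⟨hnot, hfst⟩ := pvFrameOf_eq_some hsome
    rw [hfst]
    have hlt : pvFree board (p ++ [pt]) < pvFree board p :=
      pvFree_lt_append (mem_pvCells_of_cell_moves hpt) hnot
    calc 10 * 10 ^ pvFree board (p ++ [pt]) = 10 ^ (pvFree board (p ++ [pt]) + 1) := by ring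
      _ ≤ 10 ^ pvFree board p := Nat.pow_le_pow_right (by omega) (by omega)
  have hlen : (frames.map (fun fr => 10 ^ pvFree board fr.1)).length ≤ 9 := by
    rw [List.length_map]
    exact le_trans (List.length_filterMap_le _ _) (length_cell_moves_le _ _ _)
  have hsum : ∀ (l : List Nat), (∀ t ∈ l, 10 * t ≤ 10 ^ pvFree board p) →
      10 * l.sum ≤ l.length * 10 ^ pvFree board p := by
    intro l
    induction l with
    | nil => simp
    | cons x xs ih =>
      intro hall
      simp only [List.sum_cons, List.length_cons, Nat.mul_add, Nat.add_mul, Nat.one_mul]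
      have hx := hall x (List.mem_cons_self ..)
      have hxs := ih (fun t ht => hall t (List.mem_cons_of_mem _ ht))
      omega
  have hpos : 0 < 10 ^ pvFree board p := Nat.pow_pos (by omega)
  have hmain : 10 * (frames.map (fun fr => 10 ^ pvFree board fr.1)).sum
      < 10 * 10 ^ pvFree board p := by
    refine lt_of_le_of_lt (le_trans (hsum _ hterm)
      (Nat.mul_le_mul_right _ hlen)) ?_
    omega
  omega

def bLoop (n : Int) (board : List (List String)) (flag : Bool)
    (acc : List (List (Int × Int)))
    (stack : List (List (Int × Int) × Int)) : List (List (Int × Int)) :=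
  -- stack head = top: Python pops from the END and pushes `reversed(frames)`, which is the same
  -- as popping the head after prepending `frames` in order.
  match stack with
  | [] => acc
  | (p, c) :: rest =>
    if c = n then bLoop n board flag (acc ++ [p]) rest
    else
      let last := p.getLastD (0, 0)   -- row, col = p[-1]
      let frames := pvFrames n board flag p c (cell_moves board last.1 last.2)
      bLoop n board flag acc (frames ++ rest)
termination_by (stack.map (fun fr => 10 ^ pvFree board fr.1)).sum
decreasing_by
  · have : 0 < 10 ^ pvFree board p := Nat.pow_pos (by omega)
    simp only [List.map_cons, List.sum_cons]
    omega
  · simp only [List.map_cons, List.sum_cons, List.map_append, List.sum_append,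
      frames_foldl_eq]
    have := frames_measure_lt (n := n) (board := board) (flag := flag) (p := p) (c := c)
      (row := (p.getLastD (0, 0)).1) (col := (p.getLastD (0, 0)).2)
    omega

def find_point_length_n_paths_alt (n : Int) (board : List (List String)) (list_of_legal : List (List (Int × Int))) (counter : Int) (path : List (Int × Int)) (flag : Bool) : Option (List (List (Int × Int))) :=
  if counter > n then none
  else some (bLoop n board flag list_of_legal [(path, counter)])

-- ===== PRECONDITION & SPEC =====
-- Pre_ excludes exactly the inputs on which the Python A raises IndexError: counter < n with an
-- empty path (path[-1]), and — conservatively — flag=True with a ragged board whose later rows are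
-- shorter than row 0 (A raises IndexError whenever the search touches a cell missing from a short
-- row; on the rare such boards where the search never reaches a missing cell A still returns — see
-- the cite in claim.json).
def Pre_find_point_length_n_paths (n : Int) (board : List (List String)) (list_of_legal : List (List (Int × Int))) (counter : Int) (path : List (Int × Int)) (flag : Bool) : Prop :=
  n ≤ counter ∨ (path ≠ [] ∧ (flag = true → ∀ row ∈ board, (PySem.List.pyGetD board 0 []).length ≤ row.length))
instance (n : Int) (board : List (List String)) (list_of_legal : List (List (Int × Int))) (counter : Int) (path : List (Int × Int)) (flag : Bool) : Decidable (Pre_find_point_length_n_paths n board list_of_legal counter path flag) := by unfold Pre_find_point_length_n_paths; infer_instance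

def pvWitness_find_point_length_n_paths : Int × List (List String) × (List (List (Int × Int))) × Int × (List (Int × Int)) × Bool :=
  (3, [["ab", "c"], ["d", "e"]], [], 0, [(0, 0)], true)

def Spec_find_point_length_n_paths (n : Int) (board : List (List String)) (list_of_legal : List (List (Int × Int))) (counter : Int) (path : List (Int × Int)) (flag : Bool) (out : Option (List (List (Int × Int)))) : Prop := out = find_point_length_n_paths_alt n board list_of_legal counter path flag
instance (n : Int) (board : List (List String)) (list_of_legal : List (List (Int × Int))) (counter : Int) (path : List (Int × Int)) (flag : Bool) (out : Option (List (List (Int × Int)))) : Decidable (Spec_find_point_length_n_paths n board list_of_legal counter path flag out) := by unfold Spec_find_point_length_n_paths; infer_instance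

-- ===== CLAIM (what is proved, stated in full; the proofs are below) =====
def Claim_equal_find_point_length_n_paths : Prop := ∀ (n : Int) (board : List (List String)) (list_of_legal : List (List (Int × Int))) (counter : Int) (path : List (Int × Int)) (flag : Bool), Dom_find_point_length_n_paths n board list_of_legal counter path flag → Pre_find_point_length_n_paths n board list_of_legal counter path flag → Spec_find_point_length_n_paths n board list_of_legal counter path flag (find_point_length_n_paths n board list_of_legal counter path flag)

-- ===== LEMMAS AND PROOFS =====

-- the two neighbour generators agree (A guards with is_ind_on_board, B filters a comprehension)
lemma is_ind_on_board_eq (board : List (List String)) (q : Int × Int) :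
    is_ind_on_board q board
      = decide (0 ≤ q.1 ∧ q.1 < (board.length : Int) ∧ 0 ≤ q.2 ∧
          q.2 < (if board.isEmpty then 0 else ((PySem.List.pyGetD board 0 []).length : Int))) := by
  by_cases hb : board.isEmpty
  · have hb' : board = [] := List.isEmpty_iff.1 hb
    subst hb'
    have hrow : PySem.List.pyGetD ([] : List (List String)) 0 [] = [] := rfl
    simp only [is_ind_on_board, hrow, List.length_nil, List.isEmpty_nil, if_pos]
    split_ifs with h1 h2 <;> simp <;> omega
  · simp only [is_ind_on_board, if_neg hb]
    split_ifs with h1 h2 <;> simp <;> omega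

lemma cell_moves_eq_possible_moves (board : List (List String)) (row col : Int) :
    cell_moves board row col = possible_moves board row col := by
  rw [possible_moves_eq]
  have hiff : ∀ q : Int × Int, is_ind_on_board q board = true ↔
      (0 ≤ q.1 ∧ q.1 < (board.length : Int) ∧ 0 ≤ q.2 ∧
        q.2 < (if board.isEmpty then 0 else ((PySem.List.pyGetD board 0 []).length : Int))) := by
    intro q
    rw [is_ind_on_board_eq, decide_eq_true_eq]
  by_cases h0 : is_ind_on_board (row, col) board = true
  · rw [if_pos h0]
    simp only [cell_moves]
    rw [if_neg (by simpa using (hiff (row, col)).1 h0)]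
    rw [List.filter_cons_of_pos (by rw [decide_eq_true_eq]; exact (hiff (row, col)).1 h0)]
    rw [List.filter_map]
    have hfun : ((fun q : Int × Int => decide (0 ≤ q.1 ∧ q.1 < (board.length : Int) ∧ 0 ≤ q.2 ∧
          q.2 < (if board.isEmpty then 0 else ((PySem.List.pyGetD board 0 []).length : Int))))
            ∘ (fun d : Int × Int => (row + d.1, col + d.2)))
        = fun d : Int × Int => is_ind_on_board (row + d.1, col + d.2) board := by
      funext d
      rw [Function.comp_apply]
      exact (is_ind_on_board_eq board _).symm
    rw [hfun]
  · rw [if_neg h0]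
    simp only [cell_moves]
    rw [if_pos]
    intro hcond
    exact absurd ((hiff (row, col)).2 hcond) (by simpa using h0)

-- one frame processed on the stack = one recursive call of A, provided the frame's budget is ≤ n;
-- proved by strong induction on the number of unused on-board cells
lemma bLoop_frame (nn : Int) (board : List (List String)) (flag : Bool) :
    ∀ (f : Nat) (p : List (Int × Int)) (c : Int) (acc : List (List (Int × Int)))
      (rest : List (List (Int × Int) × Int)),
      pvFree board p = f → c ≤ nn →
      bLoop nn board flag acc ((p, c) :: rest)
        = bLoop nn board flag (goA nn board flag acc c p) rest := by
  intro f
  induction f using Nat.strong_induction_on with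
  | _ f IH =>
    intro p c acc rest hf hc
    by_cases hcn : c = nn
    · subst hcn
      rw [bLoop, if_pos rfl, goA, if_neg (by omega), if_pos rfl]
    · have hclt : c < nn := lt_of_le_of_ne hc hcn
      rw [bLoop, if_neg hcn]
      rw [goA, if_neg (by omega), if_neg hcn]
      simp only [frames_foldl_eq, cell_moves_eq_possible_moves]
      have aux : ∀ (moves : List {q // q ∈ possible_moves board (p.getLastD (0, 0)).1 (p.getLastD (0, 0)).2})
          (acc : List (List (Int × Int))),
          bLoop nn board flag acc
            ((moves.unattach.filterMap (pvFrameOf nn board flag p c)) ++ rest)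
          = bLoop nn board flag
              (loopA nn board flag (p.getLastD (0, 0)).1 (p.getLastD (0, 0)).2 acc c p moves) rest := by
        intro moves
        induction moves with
        | nil => intro acc; rw [loopA]; simp
        | cons m ms ihm =>
          intro acc
          obtain ⟨pt, hpt⟩ := m
          rw [loopA]
          simp only [List.unattach_cons]
          by_cases hmem : pt ∈ p
          · rw [List.filterMap_cons_none (by simp [pvFrameOf, hmem])]
            rw [dif_pos hmem]
            exact ihm acc
          · rw [dif_neg hmem]
            have hfree : pvFree board (p ++ [pt]) < f := by
              rw [← hf]
              exact pvFree_lt_append (mem_pvCells_of_on_board (mem_possible_moves_on_board hpt)) hmem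
            have hbranch :
                (if flag = true then goA nn board flag acc (c + pvCellLen board pt) (p ++ [pt])
                 else goA nn board flag acc (c + 1) (p ++ [pt]))
                = goA nn board flag acc (c + (if flag then pvCellLen board pt else 1)) (p ++ [pt]) := by
              cases flag <;> simp
            rw [hbranch]
            by_cases hle : c + (if flag then pvCellLen board pt else 1) ≤ nn
            · rw [List.filterMap_cons_some
                (show pvFrameOf nn board flag p c pt
                    = some (p ++ [pt], c + (if flag then pvCellLen board pt else 1)) by
                  simp only [pvFrameOf, if_neg hmem, if_pos hle])]
              rw [List.cons_append]
              rw [IH _ hfree (p ++ [pt]) _ acc _ rfl hle]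
              exact ihm _
            · rw [List.filterMap_cons_none
                (by simp only [pvFrameOf, if_neg hmem, if_neg hle])]
              have hz : goA nn board flag acc (c + (if flag then pvCellLen board pt else 1))
                  (p ++ [pt]) = acc := by
                rw [goA, if_pos (by omega)]
              rw [hz]
              exact ihm acc
      have hx := aux ((possible_moves board (p.getLastD (0, 0)).1 (p.getLastD (0, 0)).2).attach) acc
      simpa [List.unattach_attach] using hx

-- ===== VERDICT (by name: the statement is the Claim_ definition above) =====
theorem find_point_length_n_paths_spec : Claim_equal_find_point_length_n_paths := by
  intro n board list_of_legal counter path flag _ hpre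
  unfold Spec_find_point_length_n_paths find_point_length_n_paths find_point_length_n_paths_alt
  by_cases hgt : counter > n
  · rw [if_pos hgt, if_pos hgt]
  · rw [if_neg hgt, if_neg hgt]
    have hx := bLoop_frame n board flag (pvFree board path) path counter list_of_legal [] rfl (by omega)
    rw [hx, bLoop]
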